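-- pv_equiv track=rewrite | github.com/TMD20/PT-Muxer | vdator3/vdator/checks/text_order.py | _sort_subs_within_lang
-- ===== SOURCE A (Python) =====
-- def _sort_subs_within_lang(text_tracks):
--     """
--     Sort subtitles within languages
--     No title, SDH, rest in alphabetical order
--     """
--     # ['', 'SDH', '...']
--     unparsed = text_tracks.copy()
--     parsed = []
--
--     # add tracks with no title
--     for track in unparsed:
--         if track["title"] == "":
--             parsed.append(track)
--     unparsed = [track for track in unparsed if track["title"] != ""]
--
--     # add tracks with SDH
--     tracks_with_SDH = []
--     for track in unparsed:
--         if "SDH" in track["title"].split():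
--             tracks_with_SDH.append(track)
--     tracks_with_SDH = sorted(tracks_with_SDH, key=lambda track: track["title"])
--     if tracks_with_SDH:
--         parsed.extend(tracks_with_SDH)
--         unparsed = [
--             track for track in unparsed if ("SDH" not in track["title"].split())
--         ]
--
--     # sort rest of the tracks in alphabetical order
--     unparsed = sorted(unparsed, key=lambda track: track["title"])
--
--     # add the rest of the tracks
--     if unparsed:
--         parsed.extend(unparsed)
--
--     return parsed
-- ===== SOURCE B (Python) =====
-- def _sort_subs_within_lang(text_tracks):
--     """Decorate-and-sort: one stable sort by the composite key (group rank, title).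
--
--     Group rank 0 = no title, 1 = SDH, 2 = rest; sort stability keeps the
--     no-title tracks in their original order (their titles all tie at "").
--     """
--     def key(track):
--         title = track["title"]
--         if title == "":
--             rank = 0
--         elif "SDH" in title.split():
--             rank = 1
--         else:
--             rank = 2
--         return (rank, title)
--
--     return sorted(text_tracks, key=key)
-- ===== Notes on version B (the rewrite author's own statement) =====
-- stated objective: alternative
-- what changed: Replaces A's partition pipeline (filter passes plus two separate sorts and conditional extends) with a single stable sort of the whole list under the composite key (group rank, title), relying on sort stability to keep the no-title group in original order.
import Mathlib
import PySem

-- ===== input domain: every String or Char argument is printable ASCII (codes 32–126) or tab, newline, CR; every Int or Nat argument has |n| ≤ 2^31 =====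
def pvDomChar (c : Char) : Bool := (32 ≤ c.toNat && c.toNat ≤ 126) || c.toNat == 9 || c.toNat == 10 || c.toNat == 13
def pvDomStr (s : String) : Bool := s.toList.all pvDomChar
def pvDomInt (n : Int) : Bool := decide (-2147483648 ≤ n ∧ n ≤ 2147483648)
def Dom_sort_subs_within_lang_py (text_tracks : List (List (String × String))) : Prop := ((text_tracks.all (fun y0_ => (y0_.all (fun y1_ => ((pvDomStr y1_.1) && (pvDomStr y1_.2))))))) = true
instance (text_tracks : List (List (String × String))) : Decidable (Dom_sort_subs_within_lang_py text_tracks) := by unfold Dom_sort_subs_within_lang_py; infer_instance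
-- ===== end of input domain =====

-- B replaces A's partition pipeline with ONE stable sort by the composite key (group rank, title); objective: alternative.


-- ===== PORT A =====
-- track["title"]: first-match association lookup; Pre_ guarantees the key is present, so the default is never used
def pvTitle (track : List (String × String)) : String := (PySem.Dict.mk track).getD "title" ""

def sort_subs_within_lang_py (text_tracks : List (List (String × String))) : List (List (String × String)) :=
  let unparsed := text_tracks
  let parsed := unparsed.foldl (fun acc track => if pvTitle track == "" then acc ++ [track] else acc) []
  let unparsed := unparsed.filter (fun track => pvTitle track != "")
  let tracks_with_SDH := unparsed.foldl (fun acc track => if (PySem.Str.split₀ (pvTitle track)).contains "SDH" then acc ++ [track] else acc) []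
  let tracks_with_SDH := PySem.List.sorted tracks_with_SDH pvTitle false
  let st := if tracks_with_SDH ≠ [] then
      (parsed ++ tracks_with_SDH, unparsed.filter (fun track => !(PySem.Str.split₀ (pvTitle track)).contains "SDH"))
    else (parsed, unparsed)
  let unparsed := PySem.List.sorted st.2 pvTitle false
  if unparsed ≠ [] then st.1 ++ unparsed else st.1

-- ===== PORT B =====
-- B's key(track) = (rank, title): rank 0 = no title, 1 = SDH in title.split(), 2 = rest
def pvRank (track : List (String × String)) : Int :=
  let title := pvTitle track
  if title == "" then 0
  else if (PySem.Str.split₀ title).contains "SDH" then 1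
  else 2

def sort_subs_within_lang_py_alt (text_tracks : List (List (String × String))) : List (List (String × String)) :=
  PySem.List.sorted2 text_tracks pvRank pvTitle false

-- ===== PRECONDITION & SPEC =====
-- Pre_ excludes exactly the tracks with no "title" key, on which the Python A raises KeyError.
def Pre_sort_subs_within_lang_py (text_tracks : List (List (String × String))) : Prop :=
  (text_tracks.all (fun track => (PySem.Dict.mk track).contains "title")) = true
instance (text_tracks : List (List (String × String))) : Decidable (Pre_sort_subs_within_lang_py text_tracks) := by unfold Pre_sort_subs_within_lang_py; infer_instance
def pvWitness_sort_subs_within_lang_py : (List (List (String × String))) := [[("title", "SDH x")], [("title", "")]]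
def Spec_sort_subs_within_lang_py (text_tracks : List (List (String × String))) (out : List (List (String × String))) : Prop := out = sort_subs_within_lang_py_alt text_tracks
instance (text_tracks : List (List (String × String))) (out : List (List (String × String))) : Decidable (Spec_sort_subs_within_lang_py text_tracks out) := by unfold Spec_sort_subs_within_lang_py; infer_instance

-- ===== CLAIM (what is proved, stated in full; the proofs are below) =====
def Claim_equal_sort_subs_within_lang_py : Prop := ∀ (text_tracks : List (List (String × String))), Dom_sort_subs_within_lang_py text_tracks → Pre_sort_subs_within_lang_py text_tracks → Spec_sort_subs_within_lang_py text_tracks (sort_subs_within_lang_py text_tracks)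

-- ===== LEMMAS AND PROOFS =====
-- the three group predicates (rank 0 / 1 / 2)
def pvP1 (t : List (String × String)) : Bool := pvTitle t == ""
def pvP2 (t : List (String × String)) : Bool := (pvTitle t != "") && (PySem.Str.split₀ (pvTitle t)).contains "SDH"
def pvP3 (t : List (String × String)) : Bool := (pvTitle t != "") && !(PySem.Str.split₀ (pvTitle t)).contains "SDH"

lemma rank_of_P1 {t : List (String × String)} (h : pvP1 t = true) : pvRank t = 0 := by
  simp [pvP1] at h; simp [pvRank, h]
lemma rank_of_P2 {t : List (String × String)} (h : pvP2 t = true) : pvRank t = 1 := by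
  simp [pvP2] at h; simp [pvRank, h.1, h.2]
lemma rank_of_P3 {t : List (String × String)} (h : pvP3 t = true) : pvRank t = 2 := by
  simp [pvP3] at h; simp [pvRank, h.1, h.2]

-- the lexicographic "before" test of B's sort
def pvLex (a b : List (String × String)) : Bool :=
  decide (pvRank a < pvRank b) || (!decide (pvRank b < pvRank a) && decide (pvTitle a < pvTitle b))
-- the title-only "before" test of A's two sorts
def pvLt (a b : List (String × String)) : Bool := decide (pvTitle a < pvTitle b)

lemma lex_false_of_rank_lt {a b : List (String × String)} (h : pvRank b < pvRank a) : pvLex a b = false := by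
  simp [pvLex, h]; omega
lemma lex_true_of_rank_lt {a b : List (String × String)} (h : pvRank a < pvRank b) : pvLex a b = true := by
  simp [pvLex, h]
lemma lex_eq_lt_of_rank_eq {a b : List (String × String)} (h : pvRank a = pvRank b) : pvLex a b = pvLt a b := by
  simp [pvLex, pvLt, h]

-- inserting past a prefix none of whose elements come after x
lemma insertBy_append_of_not_before {α : Type} (before : α → α → Bool) (x : α) (l r : List α)
    (h : ∀ y ∈ l, before x y = false) :
    PySem.List.insertBy before x (l ++ r) = l ++ PySem.List.insertBy before x r := by
  induction l with
  | nil => simp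
  | cons y ys ih =>
    simp only [List.cons_append, PySem.List.insertBy, h y (by simp)]
    simp only [Bool.false_eq_true, if_false, List.cons.injEq, true_and]
    exact ih (fun z hz => h z (by simp [hz]))

-- inserting before a list every element of which comes after x
lemma insertBy_of_all_before {α : Type} (before : α → α → Bool) (x : α) (r : List α)
    (h : ∀ y ∈ r, before x y = true) :
    PySem.List.insertBy before x r = x :: r := by
  cases r with
  | nil => simp [PySem.List.insertBy]
  | cons y ys => simp [PySem.List.insertBy, h y (by simp)]

-- inserting a rank-1 element into (rank-1 block ++ rank-2 block)
lemma insert_mid {x : List (String × String)} (hx : pvP2 x = true)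
    (c1 c2 : List (List (String × String))) (h1 : ∀ t ∈ c1, pvP2 t = true) (h2 : ∀ t ∈ c2, pvP3 t = true) :
    PySem.List.insertBy pvLex x (c1 ++ c2) = PySem.List.insertBy pvLt x c1 ++ c2 := by
  induction c1 with
  | nil =>
    simp only [List.nil_append, PySem.List.insertBy]
    exact insertBy_of_all_before pvLex x c2 (fun y hy =>
      lex_true_of_rank_lt (by rw [rank_of_P2 hx, rank_of_P3 (h2 y hy)]; norm_num))
  | cons y ys ih =>
    have hy : pvP2 y = true := h1 y (by simp)
    have hlex : pvLex x y = pvLt x y := lex_eq_lt_of_rank_eq (by rw [rank_of_P2 hx, rank_of_P2 hy])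
    have ih' := ih (fun t ht => h1 t (by simp [ht]))
    simp only [List.cons_append, PySem.List.insertBy, hlex, ih']
    by_cases hb : pvLt x y = true <;> simp [hb]

-- inserting a rank-2 element into a rank-2 block
lemma insert_last {x : List (String × String)} (hx : pvP3 x = true)
    (c2 : List (List (String × String))) (h2 : ∀ t ∈ c2, pvP3 t = true) :
    PySem.List.insertBy pvLex x c2 = PySem.List.insertBy pvLt x c2 := by
  induction c2 with
  | nil => simp [PySem.List.insertBy]
  | cons y ys ih =>
    have hlex : pvLex x y = pvLt x y :=
      lex_eq_lt_of_rank_eq (by rw [rank_of_P3 hx, rank_of_P3 (h2 y (by simp))])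
    have ih' := ih (fun t ht => h2 t (by simp [ht]))
    simp only [PySem.List.insertBy, hlex, ih']

-- x never goes before an element of smaller rank
lemma skip_block {x : List (String × String)} {rx : Int} (hx : pvRank x = rx)
    (c : List (List (String × String))) (p : List (String × String) → Bool) (rc : Int)
    (hp : ∀ t, p t = true → pvRank t = rc) (hlt : rc < rx)
    (hc : ∀ t ∈ c, p t = true) : ∀ y ∈ c, pvLex x y = false := fun y hy =>
  lex_false_of_rank_lt (by rw [hx, hp y (hc y hy)]; exact hlt)

-- MAIN INVARIANT: B's insertion-sort fold keeps the three rank blocks contiguous,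
-- appends rank-0 elements at the end of their block, and insertion-sorts the other two by title.
lemma fold_lex (l : List (List (String × String)))
    (c0 c1 c2 : List (List (String × String)))
    (h0 : ∀ t ∈ c0, pvP1 t = true) (h1 : ∀ t ∈ c1, pvP2 t = true) (h2 : ∀ t ∈ c2, pvP3 t = true) :
    l.foldl (fun acc x => PySem.List.insertBy pvLex x acc) (c0 ++ c1 ++ c2)
      = (c0 ++ l.filter pvP1)
        ++ (l.filter pvP2).foldl (fun acc x => PySem.List.insertBy pvLt x acc) c1
        ++ (l.filter pvP3).foldl (fun acc x => PySem.List.insertBy pvLt x acc) c2 := by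
  induction l generalizing c0 c1 c2 with
  | nil => simp
  | cons x xs ih =>
    rw [List.foldl_cons]
    by_cases e1 : pvP1 x = true
    · have hstep : PySem.List.insertBy pvLex x (c0 ++ c1 ++ c2) = (c0 ++ [x]) ++ c1 ++ c2 := by
        rw [List.append_assoc, insertBy_append_of_not_before pvLex x c0 (c1 ++ c2)
          (fun y hy => by
            have h10 : pvRank y = 0 := rank_of_P1 (h0 y hy)
            have hx0 : pvRank x = 0 := rank_of_P1 e1
            have ht : pvTitle x = "" := by have := e1; simpa [pvP1] using this
            have ht' : pvTitle y = "" := by have := h0 y hy; simpa [pvP1] using this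
            simp [pvLex, h10, hx0, ht, ht'])]
        rw [insertBy_of_all_before pvLex x (c1 ++ c2) (fun y hy => by
          rcases List.mem_append.mp hy with hy | hy
          · exact lex_true_of_rank_lt (by rw [rank_of_P1 e1, rank_of_P2 (h1 y hy)]; norm_num)
          · exact lex_true_of_rank_lt (by rw [rank_of_P1 e1, rank_of_P3 (h2 y hy)]; norm_num))]
        simp
      rw [hstep, ih (c0 ++ [x]) c1 c2
        (fun t ht => by rcases List.mem_append.mp ht with ht | ht
                        · exact h0 t ht
                        · simp at ht; subst ht; exact e1) h1 h2]
      have hf2 : (x :: xs).filter pvP2 = xs.filter pvP2 := by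
        simp [pvP2, (by simpa [pvP1] using e1 : pvTitle x = "")]
      have hf3 : (x :: xs).filter pvP3 = xs.filter pvP3 := by
        simp [pvP3, (by simpa [pvP1] using e1 : pvTitle x = "")]
      rw [hf2, hf3]
      simp [e1]
    · by_cases e2 : pvP2 x = true
      · have hstep : PySem.List.insertBy pvLex x (c0 ++ c1 ++ c2)
            = c0 ++ PySem.List.insertBy pvLt x c1 ++ c2 := by
          rw [List.append_assoc, insertBy_append_of_not_before pvLex x c0 (c1 ++ c2)
            (skip_block (rank_of_P2 e2) c0 pvP1 0 (fun t => rank_of_P1) (by norm_num) h0)]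
          rw [insert_mid e2 c1 c2 h1 h2, List.append_assoc]
        rw [hstep, ih c0 (PySem.List.insertBy pvLt x c1) c2
          (h0) (fun t ht => by
            rcases (PySem.List.mem_insertBy pvLt x t c1).mp ht with ht | ht
            · subst ht; exact e2
            · exact h1 t ht) h2]
        have ht : pvTitle x ≠ "" := by
          intro hc; simp [pvP2, hc] at e2
        have hf1 : (x :: xs).filter pvP1 = xs.filter pvP1 := by
          simp [pvP1, ht]
        have hf3 : (x :: xs).filter pvP3 = xs.filter pvP3 := by
          have : (PySem.Str.split₀ (pvTitle x)).contains "SDH" = true := by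
            simp [pvP2] at e2; simpa using e2.2
          simp [List.filter_cons, pvP3]
          intro _; simpa using this
        rw [hf1, hf3]
        simp [e2]
      · have e3 : pvP3 x = true := by
          simp [pvP1] at e1; simp [pvP2, e1] at e2; simp [pvP3, e1, e2]
        have hstep : PySem.List.insertBy pvLex x (c0 ++ c1 ++ c2)
            = c0 ++ c1 ++ PySem.List.insertBy pvLt x c2 := by
          rw [List.append_assoc, insertBy_append_of_not_before pvLex x c0 (c1 ++ c2)
            (skip_block (rank_of_P3 e3) c0 pvP1 0 (fun t => rank_of_P1) (by norm_num) h0)]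
          rw [insertBy_append_of_not_before pvLex x c1 c2
            (skip_block (rank_of_P3 e3) c1 pvP2 1 (fun t => rank_of_P2) (by norm_num) h1)]
          rw [insert_last e3 c2 h2, List.append_assoc]
        rw [hstep, ih c0 c1 (PySem.List.insertBy pvLt x c2)
          h0 h1 (fun t ht => by
            rcases (PySem.List.mem_insertBy pvLt x t c2).mp ht with ht | ht
            · subst ht; exact e3
            · exact h2 t ht)]
        have ht : pvTitle x ≠ "" := by
          intro hc; simp [pvP3, hc] at e3
        have hf1 : (x :: xs).filter pvP1 = xs.filter pvP1 := by
          simp [pvP1, ht]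
        have hf2 : (x :: xs).filter pvP2 = xs.filter pvP2 := by
          have : (PySem.Str.split₀ (pvTitle x)).contains "SDH" = false := by
            simp [pvP3] at e3; simpa using e3.2
          simp [List.filter_cons, pvP2]
          intro _; simpa using this
        rw [hf1, hf2]
        simp [e3]

-- B = no-title block ++ sorted SDH block ++ sorted rest
lemma alt_eq (tt : List (List (String × String))) :
    sort_subs_within_lang_py_alt tt
      = tt.filter pvP1
        ++ PySem.List.sorted (tt.filter pvP2) pvTitle false
        ++ PySem.List.sorted (tt.filter pvP3) pvTitle false := by
  have h := fold_lex tt [] [] [] (by simp) (by simp) (by simp)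
  simp only [List.append_nil, List.nil_append] at h
  rw [PySem.List.sorted_eq_foldl_insertBy, PySem.List.sorted_eq_foldl_insertBy, List.append_assoc]
  unfold pvLex pvLt at h
  rw [List.append_assoc] at h
  show List.foldl (fun acc x => PySem.List.insertBy (fun a b => decide (pvRank a < pvRank b) || !decide (pvRank b < pvRank a) && decide (pvTitle a < pvTitle b)) x acc) [] tt = _
  exact h

-- A produces the same three-block decomposition
lemma a_eq (tt : List (List (String × String))) :
    sort_subs_within_lang_py tt
      = tt.filter pvP1
        ++ PySem.List.sorted (tt.filter pvP2) pvTitle false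
        ++ PySem.List.sorted (tt.filter pvP3) pvTitle false := by
  simp only [sort_subs_within_lang_py]
  rw [PySem.List.foldl_append_if_eq_filter, PySem.List.foldl_append_if_eq_filter]
  simp only [List.nil_append, List.filter_filter]
  have hfilt1 : tt.filter (fun t => pvTitle t == "") = tt.filter pvP1 := rfl
  have hfilt2 : tt.filter (fun t => (PySem.Str.split₀ (pvTitle t)).contains "SDH" && (pvTitle t != "")) = tt.filter pvP2 := by
    apply List.filter_congr; intro t _; simp [pvP2, Bool.and_comm]
  have hfilt3 : tt.filter (fun t => !(PySem.Str.split₀ (pvTitle t)).contains "SDH" && (pvTitle t != "")) = tt.filter pvP3 := by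
    apply List.filter_congr; intro t _; simp [pvP3, Bool.and_comm]
  rw [hfilt1, hfilt2, hfilt3]
  by_cases hs : PySem.List.sorted (tt.filter pvP2) pvTitle false = []
  · have hnil : tt.filter pvP2 = [] := by
      have := PySem.List.sorted_perm (tt.filter pvP2) pvTitle false
      rw [hs] at this
      exact (List.Perm.nil_eq this).symm
    have hrest : tt.filter (fun track => pvTitle track != "") = tt.filter pvP3 := by
      apply List.filter_congr; intro t ht
      by_cases h1 : pvTitle t = ""
      · simp [pvP3, h1]
      · have h2 : "SDH" ∉ PySem.Str.split₀ (pvTitle t) := by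
          intro hm
          have : t ∈ tt.filter pvP2 := List.mem_filter.mpr ⟨ht, by simp [pvP2, h1, hm]⟩
          simp [hnil] at this
        simp [pvP3, h2]
    simp only [hs, ne_eq, not_true_eq_false, if_false]
    rw [hrest]
    by_cases he : PySem.List.sorted (tt.filter pvP3) pvTitle false = [] <;> simp [he]
  · simp only [ne_eq, hs, not_false_eq_true, if_true]
    by_cases he : PySem.List.sorted (tt.filter pvP3) pvTitle false = [] <;> simp [he]

-- ===== VERDICT (by name: the statement is the Claim_ definition above) =====
theorem sort_subs_within_lang_py_spec : Claim_equal_sort_subs_within_lang_py := by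
  intro tt _ _
  show sort_subs_within_lang_py tt = sort_subs_within_lang_py_alt tt
  rw [a_eq, alt_eq]
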